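-- pv_equiv track=rewrite | github.com/zpollock/adventofcode2024 | python/src/days/day7.py | is_valid_test
-- ===== SOURCE A (Python) =====
-- def is_valid_test(line, pos, exp_value, value, is_part2):
--     if pos == len(line):
--         return exp_value == value
--
--     curr_value = int(line[pos])
--
--     if is_valid_test(line, pos + 1, exp_value + curr_value, value, is_part2):
--         return True
--
--     if is_valid_test(line, pos + 1, curr_value if exp_value == 0 else exp_value * curr_value, value, is_part2):
--         return True
--
--     if is_part2 and pos <= len(line) - 1:
--         concatenated_value = int(str(exp_value) + str(curr_value))
--         if is_valid_test(line, pos + 1, concatenated_value, value, is_part2):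
--             return True
--
--     return False
-- ===== SOURCE B (Python) =====
-- def is_valid_test(line, pos, exp_value, value, is_part2):
--     vals = {exp_value}
--     for i in range(pos, len(line)):
--         c = int(line[i])
--         nxt = set()
--         for e in vals:
--             nxt.add(e + c)
--             nxt.add(c if e == 0 else e * c)
--             if is_part2 and c >= 0:
--                 nxt.add(int(str(e) + str(c)))
--         vals = nxt
--     return value in vals
-- ===== Notes on version B (the rewrite author's own statement) =====
-- stated objective: alternative
-- what changed: replaces A's 3-way DFS recursion with early exit by an iterative level-by-level dynamic programming pass that maintains the deduplicated set of all reachable accumulator values (skipping concatenation of a negative element, which is undefined and raises ValueError in A) and tests membership of the target at the end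
-- outside the precondition, e.g. on is_valid_test([-1], 0, 0, -1, True): A returns True, B returns True; on is_valid_test([-1], 0, 0, 5, True): A raises ValueError, B returns False
import Mathlib
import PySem

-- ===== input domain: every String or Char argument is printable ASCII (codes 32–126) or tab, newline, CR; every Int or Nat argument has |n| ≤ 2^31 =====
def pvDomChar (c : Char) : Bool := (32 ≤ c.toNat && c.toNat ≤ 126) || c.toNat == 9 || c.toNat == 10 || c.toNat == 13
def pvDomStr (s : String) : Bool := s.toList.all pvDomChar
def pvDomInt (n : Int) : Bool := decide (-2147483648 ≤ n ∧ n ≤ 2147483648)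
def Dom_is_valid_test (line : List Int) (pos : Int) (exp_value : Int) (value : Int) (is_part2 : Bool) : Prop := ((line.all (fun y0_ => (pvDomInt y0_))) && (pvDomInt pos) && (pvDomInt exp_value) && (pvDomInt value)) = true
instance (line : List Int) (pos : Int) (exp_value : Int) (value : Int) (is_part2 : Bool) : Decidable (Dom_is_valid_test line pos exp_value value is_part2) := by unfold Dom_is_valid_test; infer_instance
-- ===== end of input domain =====

-- B replaces A's 3-way DFS recursion by an iterative set-based DP over positions (return value only).


-- ===== PORT A =====
-- A's recursion, fuel-guarded for totality (fuel = number of remaining positions; the fuel-0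
-- arm is unreachable at the call sites the wrapper below produces, since a successful pyGet?
-- forces pos < len)
def ivtA (line : List Int) (value : Int) (is_part2 : Bool) (fuel : Nat) (pos : Int) (exp_value : Int) : Bool :=
  if pos = (line.length : Int) then exp_value == value
  else
    match PySem.List.pyGet? line pos with
    | none => false   -- Python raises IndexError here (excluded by Pre_)
    | some curr_value =>
      match fuel with
      | 0 => false    -- unreachable with fuel = (len - pos).toNat
      | Nat.succ f =>
        if ivtA line value is_part2 f (pos + 1) (exp_value + curr_value) then true
        else if ivtA line value is_part2 f (pos + 1) (if exp_value = 0 then curr_value else exp_value * curr_value) then true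
        else if is_part2 && decide (pos ≤ (line.length : Int) - 1) then
          -- int(str(exp_value) + str(curr_value)); none = ValueError (excluded by Pre_)
          match PySem.Int.ofChars? (PySem.Int.toChars exp_value ++ PySem.Int.toChars curr_value) with
          | none => false
          | some cv => ivtA line value is_part2 f (pos + 1) cv
        else false

def is_valid_test (line : List Int) (pos : Int) (exp_value : Int) (value : Int) (is_part2 : Bool) : Bool :=
  ivtA line value is_part2 (((line.length : Int) - pos).toNat) pos exp_value

-- ===== PORT B =====
-- one DP step: all values reachable from some value of `vals` after the element `c`
-- ('if is_part2 and c >= 0: nxt.add(int(str(e)+str(c)))' — with 0 ≤ c the parse cannot fail;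
-- the none arm is unreachable)
def ivtStep (is_part2 : Bool) (c : Int) (vals : PySem.Set Int) : PySem.Set Int :=
  vals.foldl (fun nxt e =>
    let nxt := PySem.Set.add nxt (e + c)
    let nxt := PySem.Set.add nxt (if e = 0 then c else e * c)
    if is_part2 && decide (0 ≤ c) then
      match PySem.Int.ofChars? (PySem.Int.toChars e ++ PySem.Int.toChars c) with
      | none => nxt   -- unreachable: 0 ≤ c makes str(e)+str(c) a valid int literal
      | some cv => PySem.Set.add nxt cv
    else nxt) PySem.Set.empty

def is_valid_test_alt (line : List Int) (pos : Int) (exp_value : Int) (value : Int) (is_part2 : Bool) : Bool :=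
  let vals := (PySem.List.pyRange pos (line.length : Int) 1).foldl
    (fun vals i =>
      match PySem.List.pyGet? line i with
      | none => PySem.Set.empty   -- Python raises IndexError here (excluded by Pre_)
      | some c => ivtStep is_part2 c vals)
    (PySem.Set.ofList [exp_value])
  PySem.Set.contains vals value

-- ===== PRECONDITION & SPEC =====
-- Pre_ excludes the inputs where Python A can raise: pos outside [-len(line), len(line)]
-- (IndexError on line[pos]), and, for is_part2, a negative element among the visited positions,
-- where A's concat int(str(exp)+str(c)) raises ValueError unless the search happens to succeed
-- before reaching it; that raise depends on search order and has no closed form, so the whole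
-- negative-suffix region is excluded conservatively — on its inputs where A does return, B
-- returns the same value (see cites), and where A raises, B returns the plain reachability answer (e.g. False on ([-1],0,0,5,true)).
def Pre_is_valid_test (line : List Int) (pos : Int) (exp_value : Int) (value : Int) (is_part2 : Bool) : Prop :=
  (-(line.length : Int) ≤ pos ∧ pos ≤ (line.length : Int)) ∧
  (is_part2 = true → ∀ x ∈ (if 0 ≤ pos then line.drop pos.toNat else line), 0 ≤ x)
instance (line : List Int) (pos : Int) (exp_value : Int) (value : Int) (is_part2 : Bool) : Decidable (Pre_is_valid_test line pos exp_value value is_part2) := by unfold Pre_is_valid_test; infer_instance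

def pvWitness_is_valid_test : List Int × Int × Int × Int × Bool := ([1, 2], 0, 0, 3, true)

def Spec_is_valid_test (line : List Int) (pos : Int) (exp_value : Int) (value : Int) (is_part2 : Bool) (out : Bool) : Prop := out = is_valid_test_alt line pos exp_value value is_part2
instance (line : List Int) (pos : Int) (exp_value : Int) (value : Int) (is_part2 : Bool) (out : Bool) : Decidable (Spec_is_valid_test line pos exp_value value is_part2 out) := by unfold Spec_is_valid_test; infer_instance

-- ===== CLAIM (what is proved, stated in full; the proofs are below) =====
def Claim_equal_is_valid_test : Prop := ∀ (line : List Int) (pos : Int) (exp_value : Int) (value : Int) (is_part2 : Bool), Dom_is_valid_test line pos exp_value value is_part2 → Pre_is_valid_test line pos exp_value value is_part2 → Spec_is_valid_test line pos exp_value value is_part2 (is_valid_test line pos exp_value value is_part2)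
-- ===== LEMMAS AND PROOFS =====

-- helper: pyGet? succeeding bounds the index
theorem ivt_pos_lt_of_pyGet?_some {line : List Int} {pos : Int} {c : Int}
    (h : PySem.List.pyGet? line pos = some c) : pos < (line.length : Int) := by
  by_cases hin : PySem.Raise.InRange line.length pos
  · simp [PySem.Raise.InRange] at hin; omega
  · have hn : PySem.List.pyGet? line pos = none := by
      rw [PySem.List.pyGet?_eq_none_iff]; exact hin
    rw [hn] at h; exact absurd h (by simp)

-- helper: an element read at index i ≥ pos ≥ 0 lies in the dropped suffix
theorem ivt_mem_drop_of_pyGet? {line : List Int} {pos i c : Int}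
    (hp : 0 ≤ pos) (hpi : pos ≤ i) (h : PySem.List.pyGet? line i = some c) :
    c ∈ line.drop pos.toNat := by
  have h0i : 0 ≤ i := le_trans hp hpi
  rw [PySem.List.pyGet?_of_nonneg line h0i] at h
  rw [List.getElem?_eq_some_iff] at h
  obtain ⟨hlt, hc⟩ := h
  have hle : pos.toNat ≤ i.toNat := by omega
  have hlt' : i.toNat - pos.toNat < (line.drop pos.toNat).length := by
    simp [List.length_drop]; omega
  have heq : (line.drop pos.toNat)[i.toNat - pos.toNat]'hlt' = c := by
    rw [List.getElem_drop, ← hc]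
    congr 1
    omega
  exact heq ▸ List.getElem_mem hlt'

-- the successor values of one accumulator value e after element c
def ivtSuccs (is_part2 : Bool) (c : Int) (e : Int) : List Int :=
  (e + c) :: (if e = 0 then c else e * c) ::
    (if is_part2 && decide (0 ≤ c) then
      (match PySem.Int.ofChars? (PySem.Int.toChars e ++ PySem.Int.toChars c) with
       | none => []
       | some cv => [cv])
     else [])

theorem mem_ivtStep (is_part2 : Bool) (c x : Int) (vals : PySem.Set Int) :
    x ∈ ivtStep is_part2 c vals ↔ ∃ e ∈ vals, x ∈ ivtSuccs is_part2 c e := by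
  unfold ivtStep
  suffices h : ∀ (l : List Int) (acc : PySem.Set Int),
      x ∈ l.foldl (fun nxt e =>
        let nxt := PySem.Set.add nxt (e + c)
        let nxt := PySem.Set.add nxt (if e = 0 then c else e * c)
        if is_part2 && decide (0 ≤ c) then
          match PySem.Int.ofChars? (PySem.Int.toChars e ++ PySem.Int.toChars c) with
          | none => nxt
          | some cv => PySem.Set.add nxt cv
        else nxt) acc ↔ x ∈ acc ∨ ∃ e ∈ l, x ∈ ivtSuccs is_part2 c e by
    rw [h]; simp [PySem.Set.empty]
  intro l
  induction l with
  | nil => simp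
  | cons e l ih =>
    intro acc
    rw [List.foldl_cons, ih]
    cases hb : (is_part2 && decide (0 ≤ c)) with
    | false => simp [ivtSuccs, hb, PySem.Set.mem_add, or_assoc]
    | true =>
      cases hp : PySem.Int.ofChars? (PySem.Int.toChars e ++ PySem.Int.toChars c) with
      | none => simp [ivtSuccs, hb, hp, PySem.Set.mem_add, or_assoc]
      | some cv => simp [ivtSuccs, hb, hp, PySem.Set.mem_add, or_assoc]

-- one unfolding of A at a position where the element read succeeds and is nonnegative under part2
theorem ivt_eq_any_succs (line : List Int) (pos exp_value value : Int) (is_part2 : Bool)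
    (c : Int) (hc : PySem.List.pyGet? line pos = some c)
    (hcp : is_part2 = true → 0 ≤ c) :
    is_valid_test line pos exp_value value is_part2 =
      (ivtSuccs is_part2 c exp_value).any
        (fun e' => is_valid_test line (pos + 1) e' value is_part2) := by
  have hlt := ivt_pos_lt_of_pyGet?_some hc
  have hfuel : ((line.length : Int) - pos).toNat = (((line.length : Int) - (pos + 1)).toNat) + 1 := by
    omega
  have hw : ∀ e : Int, ivtA line value is_part2 (((line.length : Int) - (pos + 1)).toNat) (pos + 1) e
      = is_valid_test line (pos + 1) e value is_part2 := fun e => rfl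
  rw [is_valid_test, hfuel, ivtA, if_neg (by omega), hc]
  simp only [hw]
  have hg : decide (pos ≤ (line.length : Int) - 1) = true := by simp; omega
  cases is_part2 with
  | false =>
    simp only [ivtSuccs, Bool.false_and, List.any_cons]
    split_ifs <;> simp_all
  | true =>
    have hc0 : decide (0 ≤ c) = true := by simp [hcp rfl]
    simp only [hg, hc0, Bool.and_self, if_true, ivtSuccs]
    cases hp : PySem.Int.ofChars? (PySem.Int.toChars exp_value ++ PySem.Int.toChars c) with
    | none => simp only [List.any_cons]; split_ifs <;> simp_all
    | some cv => simp only [List.any_cons]; split_ifs <;> simp_all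

-- main invariant: the DP fold from any starting set computes "some start value succeeds in A",
-- carrying nonnegativity of the yet-unread elements under part2
theorem ivt_main (line : List Int) (value : Int) (is_part2 : Bool) :
    ∀ (n : Nat) (pos : Int), -(line.length : Int) ≤ pos → pos ≤ (line.length : Int) →
      (((line.length : Int) - pos).toNat = n) →
      (is_part2 = true → ∀ i c, pos ≤ i → PySem.List.pyGet? line i = some c → 0 ≤ c) →
      ∀ (S : PySem.Set Int),
      PySem.Set.contains
        ((PySem.List.pyRange pos (line.length : Int) 1).foldl
          (fun vals i =>
            match PySem.List.pyGet? line i with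
            | none => PySem.Set.empty
            | some c => ivtStep is_part2 c vals) S)
        value
      = S.any (fun e => is_valid_test line pos e value is_part2) := by
  intro n
  induction n with
  | zero =>
    intro pos h1 h2 h3 _ S
    have hpos : pos = (line.length : Int) := by omega
    subst hpos
    rw [PySem.List.pyRange_one_eq_nil (le_refl _), List.foldl_nil]
    have : ∀ e : Int, is_valid_test line (line.length : Int) e value is_part2 = (e == value) := by
      intro e; rw [is_valid_test, ivtA]; simp
    simp only [this]
    rw [Bool.eq_iff_iff, PySem.Set.contains_iff, List.any_eq_true]
    constructor
    · intro h; exact ⟨value, h, by simp⟩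
    · rintro ⟨e, he, hbe⟩
      rw [beq_iff_eq] at hbe; subst hbe; exact he
  | succ n ih =>
    intro pos h1 h2 h3 hneg S
    have hlt : pos < (line.length : Int) := by omega
    rw [PySem.List.pyRange_one_cons hlt, List.foldl_cons]
    obtain ⟨c, hc⟩ : ∃ c, PySem.List.pyGet? line pos = some c := by
      cases hg : PySem.List.pyGet? line pos with
      | none =>
        rw [PySem.List.pyGet?_eq_none_iff] at hg
        exact absurd (by simp [PySem.Raise.InRange]; omega) hg
      | some c => exact ⟨c, rfl⟩
    simp only [hc]
    rw [ih (pos + 1) (by omega) (by omega) (by omega)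
        (fun hp2 i c' hi hg => hneg hp2 i c' (by omega) hg) (ivtStep is_part2 c S)]
    have hcp : is_part2 = true → 0 ≤ c := fun hp2 => hneg hp2 pos c (le_refl _) hc
    rw [Bool.eq_iff_iff]
    simp only [List.any_eq_true, mem_ivtStep]
    constructor
    · rintro ⟨x, ⟨e, he, hx⟩, hv⟩
      refine ⟨e, he, ?_⟩
      rw [ivt_eq_any_succs line pos e value is_part2 c hc hcp]
      simp only [List.any_eq_true]
      exact ⟨x, hx, hv⟩
    · rintro ⟨e, he, hv⟩
      rw [ivt_eq_any_succs line pos e value is_part2 c hc hcp] at hv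
      simp only [List.any_eq_true] at hv
      obtain ⟨x, hx, hxv⟩ := hv
      exact ⟨x, ⟨e, he, hx⟩, hxv⟩

-- Pre_'s nonneg-suffix clause yields the element-wise form ivt_main carries
theorem ivt_pre_neg {line : List Int} {pos : Int}
    (h1 : -(line.length : Int) ≤ pos)
    (h2 : ∀ x ∈ (if 0 ≤ pos then line.drop pos.toNat else line), 0 ≤ x) :
    ∀ i c, pos ≤ i → PySem.List.pyGet? line i = some c → 0 ≤ c := by
  intro i c hpi hg
  by_cases h0 : 0 ≤ pos
  · rw [if_pos h0] at h2
    exact h2 c (ivt_mem_drop_of_pyGet? h0 hpi hg)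
  · rw [if_neg h0] at h2
    exact h2 c (PySem.List.mem_of_pyGet?_eq_some line hg)

-- ===== VERDICT (by name: the statement is the Claim_ definition above) =====
theorem is_valid_test_spec : Claim_equal_is_valid_test := by
  intro line pos exp_value value is_part2 _hdom hpre
  unfold Spec_is_valid_test is_valid_test_alt
  rw [ivt_main line value is_part2 (((line.length : Int) - pos).toNat) pos hpre.1.1 hpre.1.2 rfl
      (fun hp2 => ivt_pre_neg hpre.1.1 (hpre.2 hp2))]
  simp [PySem.Set.ofList]
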